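-- pv_equiv track=rewrite | github.com/JakubWorek/algorithms_and_data_structures_course | DYNAMIC/DYNAMIKI_ALGORYTMY/ksum.py | ksuma
-- ===== SOURCE A (Python) =====
-- from math import inf
--
-- def ksuma( T, k ):
--     n = len(T)
--     DP = [inf for _ in range(n)]
--
--     if k == 1: return sum(T)
--     if k >= n: return min(T)
--
--     # base case
--     for i in range(k):
--         DP[i] = T[i]
--
--     # główne działania
--     for i in range(k, n):
--         for j in range(i-k, i):
--             DP[i] = min(DP[i], T[i]+DP[j])
--
--     mini = inf
--     for i in range(n-k, n):
--         mini = min(mini, DP[i])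
--     return mini
-- ===== SOURCE B (Python) =====
-- def ksuma(T, k):
--     n = len(T)
--     if k == 1:
--         return sum(T)
--     if k >= n:
--         return min(T)
--     DP = [0] * n
--     dq = []      # monotonic deque of (index, DP value); values strictly increase
--     head = 0     # front pointer: elements before `head` are discarded
--     for i in range(n):
--         if i < k:
--             v = T[i]
--         else:
--             while head < len(dq) and dq[head][0] < i - k:
--                 head += 1
--             v = T[i] + dq[head][1]
--         DP[i] = v
--         while len(dq) > head and dq[-1][1] >= v:
--             dq.pop()
--         dq.append((i, v))
--     return min(DP[n - k:])
-- ===== Notes on version B (the rewrite author's own statement) =====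
-- stated objective: faster
-- what changed: Replaces A's inner scan of the k previous DP values by a monotonic deque (index,value pairs with a front pointer) that yields each sliding-window minimum in amortized O(1), turning the O(n*k) DP into O(n).
-- outside the precondition, e.g. on ksuma([1, 2], 0): A returns inf, B raises IndexError; on ksuma([], 2): A raises ValueError, B raises ValueError
import Mathlib
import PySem

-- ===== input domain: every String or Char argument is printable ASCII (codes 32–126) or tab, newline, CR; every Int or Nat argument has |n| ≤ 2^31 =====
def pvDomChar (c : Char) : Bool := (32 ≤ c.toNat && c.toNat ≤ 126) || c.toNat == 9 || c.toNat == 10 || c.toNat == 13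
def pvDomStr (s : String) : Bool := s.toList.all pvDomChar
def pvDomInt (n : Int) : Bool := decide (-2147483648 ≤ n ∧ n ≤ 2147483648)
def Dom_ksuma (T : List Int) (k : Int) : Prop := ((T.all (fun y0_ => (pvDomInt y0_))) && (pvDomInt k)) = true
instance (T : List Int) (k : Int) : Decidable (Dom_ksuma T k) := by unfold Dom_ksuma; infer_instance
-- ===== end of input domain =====

-- B replaces A's O(n*k) inner scan over the k previous DP values by a monotonic deque giving
-- each sliding-window minimum in amortized O(1) (O(n) total); objective: faster (asymptotic).

-- ===== PORT A =====
-- float('inf') is modelled by `none`; `pyominf` is Python's `min` lifted to it (inf = none).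
def pyominf : Option Int → Option Int → Option Int
  | none, b => b
  | some x, none => some x
  | some x, some y => some (min x y)

-- All list indices used below are nonnegative and in range on the executed branch,
-- so `.toNat` together with `getD` is exact for Python's indexing here.
def ksuma (T : List Int) (k : Int) : Int :=
  let n : Int := (T.length : Int)
  let DP : List (Option Int) := (List.range T.length).map (fun _ => none)
  if k = 1 then T.foldl (· + ·) 0
  else if k ≥ n then (PySem.List.min? T (fun x => x)).getD 0   -- min([]) raises: outside Pre_
  else
    -- base case
    let DP := (PySem.List.pyRange 0 k 1).foldl
      (fun DP i => DP.set i.toNat (some (PySem.List.pyGetD T i 0))) DP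
    -- główne działania
    let DP := (PySem.List.pyRange k n 1).foldl
      (fun DP i =>
        (PySem.List.pyRange (i - k) i 1).foldl
          (fun DP j =>
            DP.set i.toNat (pyominf ((DP.getD i.toNat none))
              ((DP.getD j.toNat none).map (fun d => PySem.List.pyGetD T i 0 + d)))) DP) DP
    let mini : Option Int := (PySem.List.pyRange (n - k) n 1).foldl
      (fun m i => pyominf m (DP.getD i.toNat none)) none
    mini.getD 0

-- ===== PORT B =====
-- `while head < len(dq) and dq[head][0] < limit: head += 1`
def ksumaAdvance (dq : List (Int × Int)) (limit : Int) (head : Nat) : Nat :=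
  if h : head < dq.length then
    if (dq.getD head (0, 0)).1 < limit then ksumaAdvance dq limit (head + 1) else head
  else head
termination_by dq.length - head

-- `while len(dq) > head and dq[-1][1] >= v: dq.pop()`
def ksumaPop (v : Int) (head : Nat) (dq : List (Int × Int)) : List (Int × Int) :=
  if h : head < dq.length then
    if (dq.getLast (by intro hnil; simp [hnil] at h)).2 ≥ v then
      ksumaPop v head dq.dropLast
    else dq
  else dq
termination_by dq.length
decreasing_by simp [List.length_dropLast]; omega

def ksuma_alt (T : List Int) (k : Int) : Int :=
  let n : Int := (T.length : Int)
  if k = 1 then T.foldl (· + ·) 0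
  else if k ≥ n then (PySem.List.min? T (fun x => x)).getD 0
  else
    let DP0 : List Int := (List.range T.length).map (fun _ => (0 : Int))
    let st := (PySem.List.pyRange 0 n 1).foldl
      (fun (s : List Int × List (Int × Int) × Nat) i =>
        let DP := s.1; let dq := s.2.1; let head := s.2.2
        let hv : Nat × Int :=
          if i < k then (head, PySem.List.pyGetD T i 0)
          else
            let head := ksumaAdvance dq (i - k) head
            (head, PySem.List.pyGetD T i 0 + (dq.getD head (0, 0)).2)
        let head := hv.1; let v := hv.2
        let DP := DP.set i.toNat v
        let dq := ksumaPop v head dq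
        let dq := dq ++ [(i, v)]
        (DP, dq, head)) (DP0, ([], 0))
    (PySem.List.min? (PySem.List.slice st.1 (some (n - k)) none) (fun x => x)).getD 0

-- ===== PRECONDITION & SPEC =====
-- Pre_ excludes exactly: k ≤ 0, where A returns float inf (not an int) or raises ValueError
-- on empty T; and empty T with k ≥ 2, where A raises ValueError (min of an empty list).
def Pre_ksuma (T : List Int) (k : Int) : Prop := 1 ≤ k ∧ (T ≠ [] ∨ k = 1)
instance (T : List Int) (k : Int) : Decidable (Pre_ksuma T k) := by unfold Pre_ksuma; infer_instance

def pvWitness_ksuma : List Int × Int := ([3, -1, 4, 1, -5], 2)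

def Spec_ksuma (T : List Int) (k : Int) (out : Int) : Prop := out = ksuma_alt T k
instance (T : List Int) (k : Int) (out : Int) : Decidable (Spec_ksuma T k out) := by unfold Spec_ksuma; infer_instance

-- ===== CLAIM (what is proved, stated in full; the proofs are below) =====
def Claim_equal_ksuma : Prop := ∀ (T : List Int) (k : Int), Dom_ksuma T k → Pre_ksuma T k → Spec_ksuma T k (ksuma T k)

-- ===== LEMMAS AND PROOFS =====

-- ===== LEMMAS AND PROOFS =====

-- min of a nonempty list (Python's running-min loop); 0 for [] (never used there)
def pvWmin : List Int → Int
  | [] => 0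
  | x :: t => t.foldl min x

-- the DP sequence both programs compute: dp i = T[i] for i < K, else T[i] + min of the
-- previous K dp values; `pvDpl T K m` is [dp 0, …, dp (m-1)]
def pvDpl (T : List Int) (K : Nat) : Nat → List Int
  | 0 => []
  | m + 1 =>
      let p := pvDpl T K m
      p ++ [if m < K then T.getD m 0 else T.getD m 0 + pvWmin ((p.drop (m - K)).take K)]

def pvDpv (T : List Int) (K m : Nat) : Int := (pvDpl T K (m + 1)).getD m 0

-- A's DP list after m steps: dp values so far, `none` (= inf) beyond
def pvStateA (T : List Int) (K n m : Nat) : List (Option Int) :=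
  ((pvDpl T K m).map some) ++ List.replicate (n - m) none

-- the loop body of ksuma_alt's fold, named for the proofs (definitionally the lambda in ksuma_alt)
def pvStep (T : List Int) (k : Int) (s : List Int × List (Int × Int) × Nat) (i : Int) :
    List Int × List (Int × Int) × Nat :=
  let DP := s.1; let dq := s.2.1; let head := s.2.2
  let hv : Nat × Int :=
    if i < k then (head, PySem.List.pyGetD T i 0)
    else
      let head := ksumaAdvance dq (i - k) head
      (head, PySem.List.pyGetD T i 0 + (dq.getD head (0, 0)).2)
  let head := hv.1; let v := hv.2
  let DP := DP.set i.toNat v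
  let dq := ksumaPop v head dq
  let dq := dq ++ [(i, v)]
  (DP, dq, head)

-- the effect of ksumaPop on the live part of the deque, as its own recursion
def pvPopSpec (v : Int) (l : List (Int × Int)) : List (Int × Int) :=
  if h : l ≠ [] then
    if (l.getLast h).2 ≥ v then pvPopSpec v l.dropLast else l
  else l
termination_by l.length
decreasing_by
  have hp : 0 < l.length := List.length_pos_iff.mpr h
  simp only [List.length_dropLast]; omega

-- B's loop invariant after m steps (2 ≤ K < n = T.length, 1 ≤ m ≤ n):
-- DP holds the first m dp values; the live deque dq.drop head has strictly increasing
-- indices and values, all of the form (j, dp j) with j < m, ends with (m-1, dp (m-1)),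
-- and every recent j (m ≤ K + j) is dominated by some deque entry at or after it.
def pvInv (T : List Int) (K n m : Nat) (s : List Int × List (Int × Int) × Nat) : Prop :=
  s.1 = pvDpl T K m ++ List.replicate (n - m) 0 ∧
  s.2.2 ≤ s.2.1.length ∧
  (s.2.1.drop s.2.2).Pairwise (fun p q => p.1 < q.1) ∧
  (s.2.1.drop s.2.2).Pairwise (fun p q => p.2 < q.2) ∧
  (∀ p ∈ s.2.1.drop s.2.2, ∃ j : Nat, p.1 = (j : Int) ∧ j < m ∧ p.2 = pvDpv T K j) ∧
  (s.2.1.drop s.2.2).getLast? = some (((m - 1 : Nat) : Int), pvDpv T K (m - 1)) ∧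
  (∀ j : Nat, j < m → m ≤ K + j → ∃ p ∈ s.2.1.drop s.2.2, (j : Int) ≤ p.1 ∧ p.2 ≤ pvDpv T K j)

-- ---------- generic list facts ----------

theorem pvDropLastDrop {α : Type} (l : List α) (n : Nat) :
    l.dropLast.drop n = (l.drop n).dropLast := by
  simp [List.dropLast_eq_take, List.drop_take]; omega

theorem pvDropLastTake {α : Type} (l : List α) (n : Nat) (h : n < l.length) :
    l.dropLast.take n = l.take n := by
  simp [List.dropLast_eq_take, List.take_take]; omega

theorem pvGetLastDrop {α : Type} (l : List α) (n : Nat) (h : n < l.length) :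
    (l.drop n).getLast? = l.getLast? := by
  induction l generalizing n with
  | nil => simp at h
  | cons a t ih =>
    cases n with
    | zero => simp
    | succ m =>
      have hm : m < t.length := by simpa using h
      have ht : t ≠ [] := by intro h0; subst h0; simp at hm
      simp only [List.drop_succ_cons, ih m hm]
      rcases t with _ | _ <;> simp_all

theorem pvGetDDrop {α : Type} (l : List α) (n : Nat) (d : α) :
    l.getD n d = ((l.drop n).head?).getD d := by
  rw [List.head?_drop, List.getD_eq_getElem?_getD]

theorem pvSetAppendReplicate {α : Type} (xs : List α) (c : Nat) (d v : α) (hc : 0 < c) :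
    (xs ++ List.replicate c d).set xs.length v
      = (xs ++ [v]) ++ List.replicate (c - 1) d := by
  obtain ⟨c', rfl⟩ : ∃ c', c = c' + 1 := ⟨c - 1, by omega⟩
  simp [List.replicate_succ]

theorem pvPairwiseLast {α : Type} (r : α → α → Prop) (l : List α) (a : α)
    (hp : List.Pairwise r l) (hl : l.getLast? = some a) : ∀ x ∈ l, x = a ∨ r x a := by
  have hne : l ≠ [] := by intro h0; subst h0; simp at hl
  have ha : a = l.getLast hne := by
    have := List.getLast?_eq_some_getLast (l := l) hne
    rw [hl] at this; exact Option.some_injective _ this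
  subst ha
  have hsplit := List.dropLast_append_getLast hne
  intro x hx
  rw [← hsplit] at hp hx
  rcases List.mem_append.mp hx with hx1 | hx2
  · right
    rcases List.pairwise_append.mp hp with ⟨_, _, hr⟩
    exact hr x hx1 _ (by simp)
  · left; simpa using hx2

-- ---------- pvPopSpec / ksumaPop / ksumaAdvance ----------

theorem pvPopSpec_prefix (v : Int) (l : List (Int × Int)) : (pvPopSpec v l).IsPrefix l := by
  induction l using pvPopSpec.induct (v := v) with
  | case1 l h hge ih =>
    rw [pvPopSpec, dif_pos h, if_pos hge]
    exact ih.trans (List.dropLast_prefix l)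
  | case2 l h hge => rw [pvPopSpec, dif_pos h, if_neg hge]
  | case3 l h => rw [pvPopSpec, dif_neg h]

theorem pvPopSpec_last (v : Int) (l : List (Int × Int)) :
    ∀ p, (pvPopSpec v l).getLast? = some p → p.2 < v := by
  induction l using pvPopSpec.induct (v := v) with
  | case1 l h hge ih => rw [pvPopSpec, dif_pos h, if_pos hge]; exact ih
  | case2 l h hge =>
    rw [pvPopSpec, dif_pos h, if_neg hge]
    intro p hp
    rw [List.getLast?_eq_some_getLast (l := l) h] at hp
    cases Option.some_injective _ hp; omega
  | case3 l h =>
    rw [pvPopSpec, dif_neg h]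
    intro p hp
    have : l = [] := by by_contra h0; exact h h0
    subst this; cases hp

theorem pvPopSpec_removed (v : Int) (l : List (Int × Int)) :
    ∀ p ∈ l, p ∈ pvPopSpec v l ∨ v ≤ p.2 := by
  induction l using pvPopSpec.induct (v := v) with
  | case1 l h hge ih =>
    rw [pvPopSpec, dif_pos h, if_pos hge]
    intro p hp
    rw [← List.dropLast_append_getLast h] at hp
    rcases List.mem_append.mp hp with h1 | h2
    · exact ih p h1
    · right; simp at h2; subst h2; omega
  | case2 l h hge => rw [pvPopSpec, dif_pos h, if_neg hge]; intro p hp; left; exact hp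
  | case3 l h =>
    intro p hp
    have : l = [] := by by_contra h0; exact h h0
    subst this; cases hp

theorem pvPop_eq (v : Int) (head : Nat) (dq : List (Int × Int)) (h : head ≤ dq.length) :
    ksumaPop v head dq = dq.take head ++ pvPopSpec v (dq.drop head) := by
  induction dq using ksumaPop.induct (v := v) (head := head) with
  | case1 dq hlt hge ih =>
    rw [ksumaPop, dif_pos hlt, if_pos hge]
    have hne : dq ≠ [] := by intro h0; subst h0; simp at hlt
    have h' : head ≤ dq.dropLast.length := by simp only [List.length_dropLast]; omega
    rw [ih h', pvDropLastTake dq head hlt, pvDropLastDrop]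
    have hqne : dq.drop head ≠ [] := by
      intro h0; have := List.drop_eq_nil_iff.mp h0; omega
    have hlast : (dq.drop head).getLast hqne = dq.getLast hne := by
      have h1 := List.getLast?_eq_some_getLast (l := dq.drop head) hqne
      rw [pvGetLastDrop dq head hlt, List.getLast?_eq_some_getLast (l := dq) hne] at h1
      exact Option.some_injective _ h1.symm
    have key : pvPopSpec v (dq.drop head) = pvPopSpec v ((dq.drop head).dropLast) := by
      rw [pvPopSpec, dif_pos hqne, if_pos (by rw [hlast]; exact hge)]
    rw [key]
  | case2 dq hlt hge =>
    rw [ksumaPop, dif_pos hlt, if_neg hge]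
    have hne : dq ≠ [] := by intro h0; subst h0; simp at hlt
    have hqne : dq.drop head ≠ [] := by
      intro h0; have := List.drop_eq_nil_iff.mp h0; omega
    have hlast : (dq.drop head).getLast hqne = dq.getLast hne := by
      have h1 := List.getLast?_eq_some_getLast (l := dq.drop head) hqne
      rw [pvGetLastDrop dq head hlt, List.getLast?_eq_some_getLast (l := dq) hne] at h1
      exact Option.some_injective _ h1.symm
    have key : pvPopSpec v (dq.drop head) = dq.drop head := by
      rw [pvPopSpec, dif_pos hqne, if_neg (by rw [hlast]; exact hge)]
    rw [key, List.take_append_drop]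
  | case3 dq hlt =>
    rw [ksumaPop, dif_neg hlt]
    have : head = dq.length := by omega
    subst this
    simp [pvPopSpec]

theorem pvAdvance_drop (dq : List (Int × Int)) (limit : Int) (head : Nat) :
    dq.drop (ksumaAdvance dq limit head)
      = (dq.drop head).dropWhile (fun p => decide (p.1 < limit)) ∧
    head ≤ ksumaAdvance dq limit head := by
  induction head using ksumaAdvance.induct (dq := dq) (limit := limit) with
  | case1 head hlt hcond ih =>
    rw [ksumaAdvance, dif_pos hlt, if_pos hcond]
    refine ⟨?_, le_trans (Nat.le_succ head) ih.2⟩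
    rw [ih.1, List.drop_eq_getElem_cons hlt, List.dropWhile_cons]
    rw [List.getD_eq_getElem?_getD, List.getElem?_eq_getElem hlt] at hcond
    simp only [Option.getD_some] at hcond
    simp [hcond]
  | case2 head hlt hcond =>
    rw [ksumaAdvance, dif_pos hlt, if_neg hcond]
    refine ⟨?_, le_refl _⟩
    rw [List.drop_eq_getElem_cons hlt, List.dropWhile_cons]
    rw [List.getD_eq_getElem?_getD, List.getElem?_eq_getElem hlt] at hcond
    simp only [Option.getD_some] at hcond
    simp [hcond]
  | case3 head hlt =>
    rw [ksumaAdvance, dif_neg hlt]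
    have : dq.drop head = [] := List.drop_eq_nil_iff.mpr (by omega)
    simp [this]

theorem pvDropWhileLast {α : Type} (p : α → Bool) (l : List α) (a : α)
    (hl : l.getLast? = some a) (ha : p a = false) :
    (l.dropWhile p).getLast? = some a := by
  induction l with
  | nil => cases hl
  | cons x t ih =>
    by_cases hx : p x = true
    · rw [List.dropWhile_cons, if_pos hx]
      rcases t with _ | ⟨y, t'⟩
      · have hxa : x = a := by simpa using hl
        rw [hxa, ha] at hx; cases hx
      · exact ih (by simpa using hl)
    · rw [List.dropWhile_cons, if_neg hx]
      simpa using hl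

-- ---------- pvWmin / pyominf ----------

theorem pvWmin_le (l : List Int) : ∀ x ∈ l, pvWmin l ≤ x := by
  cases l with
  | nil => simp
  | cons a t =>
    intro x hx
    rcases List.mem_cons.mp hx with rfl | hx
    · exact (PySem.List.foldl_min_le t x).1
    · exact (PySem.List.foldl_min_le t a).2 x hx

theorem pvWmin_mem (l : List Int) (h : l ≠ []) : pvWmin l ∈ l := by
  cases l with
  | nil => exact absurd rfl h
  | cons a t =>
    rcases PySem.List.foldl_min_mem t a with h1 | h1
    · simp [pvWmin, h1]
    · simp [pvWmin, List.mem_cons, h1]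

theorem pvWmin_eq_of_le (l : List Int) (x : Int) (hmem : x ∈ l)
    (hle : ∀ y ∈ l, x ≤ y) : pvWmin l = x :=
  le_antisymm (pvWmin_le l x hmem)
    (hle _ (pvWmin_mem l (by intro h0; subst h0; cases hmem)))

theorem pvFoldlMinAdd (c : Int) (l : List Int) :
    ∀ x : Int, l.foldl (fun a b => min a b) (c + x) = c + (l.map (fun d => d - c)).foldl min x := by
  induction l with
  | nil => intro x; simp
  | cons a t ih =>
    intro x
    simp only [List.foldl_cons, List.map_cons]
    rw [show min (c + x) a = c + min x (a - c) by omega, ih]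

theorem pvWmin_add (c : Int) (l : List Int) (h : l ≠ []) :
    pvWmin (l.map (fun d => c + d)) = c + pvWmin l := by
  cases l with
  | nil => exact absurd rfl h
  | cons a t =>
    simp only [pvWmin, List.map_cons]
    rw [show c + a = c + a by rfl, pvFoldlMinAdd c (t.map (fun d => c + d)) a]
    congr 1
    congr 1
    · rw [List.map_map]
      conv_rhs => rw [← List.map_id t]
      apply List.map_congr_left
      intro d _
      simp

theorem pvFoldlOminfSome (vs : List Int) : ∀ x : Int,
    vs.foldl (fun c v => pyominf c (some v)) (some x) = some (vs.foldl min x) := by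
  induction vs with
  | nil => intro x; rfl
  | cons a t ih => intro x; simp only [List.foldl_cons, pyominf]; exact ih (min x a)

theorem pvFoldlOminfNone (vs : List Int) (h : vs ≠ []) :
    vs.foldl (fun c v => pyominf c (some v)) none = some (pvWmin vs) := by
  cases vs with
  | nil => exact absurd rfl h
  | cons a t => simp only [List.foldl_cons, pyominf, pvWmin]; exact pvFoldlOminfSome t a

-- ---------- the dp sequence ----------

theorem pvDpl_length (T : List Int) (K m : Nat) : (pvDpl T K m).length = m := by
  induction m with
  | zero => rfl
  | succ m ih => simp [pvDpl, ih]

theorem pvDpl_getD (T : List Int) (K : Nat) :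
    ∀ m j : Nat, j < m → (pvDpl T K m).getD j 0 = pvDpv T K j := by
  intro m
  induction m with
  | zero => intro j hj; omega
  | succ m ih =>
    intro j hj
    by_cases hjm : j < m
    · rw [show pvDpl T K (m+1) = pvDpl T K m ++ _ from rfl,
          List.getD_append _ _ _ _ (by rw [pvDpl_length]; exact hjm)]
      exact ih j hjm
    · have : j = m := by omega
      subst this
      rfl

theorem pvDpv_lt (T : List Int) (K m : Nat) (h : m < K) : pvDpv T K m = T.getD m 0 := by
  simp [pvDpv, pvDpl, pvDpl_length, h]

theorem pvWin_eq (T : List Int) (K m : Nat) (hK : K ≤ m) :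
    (pvDpl T K m).drop (m - K) = (List.range K).map (fun t => pvDpv T K (m - K + t)) := by
  apply List.ext_getElem
  · simp [pvDpl_length]; omega
  · intro i h1 h2
    have hi : i < K := by simpa using h2
    have him : m - K + i < m := by omega
    rw [List.getElem_drop, List.getElem_map, List.getElem_range]
    have := pvDpl_getD T K m (m - K + i) him
    rw [List.getD_eq_getElem _ _ (by rw [pvDpl_length]; omega)] at this
    exact this

theorem pvDpv_ge (T : List Int) (K m : Nat) (_h2 : 1 ≤ K) (h : K ≤ m) :
    pvDpv T K m = T.getD m 0 + pvWmin ((List.range K).map (fun t => pvDpv T K (m - K + t))) := by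
  have hval : pvDpv T K m
      = if m < K then T.getD m 0 else T.getD m 0 + pvWmin (((pvDpl T K m).drop (m - K)).take K) := by
    simp [pvDpv, pvDpl, pvDpl_length]
  rw [hval, if_neg (by omega)]
  congr 1
  rw [List.take_of_length_le (by simp [pvDpl_length]; omega), pvWin_eq T K m h]

-- ---------- side A ----------

theorem pvStateA_length (T : List Int) (K n m : Nat) (h : m ≤ n) :
    (pvStateA T K n m).length = n := by
  simp [pvStateA, pvDpl_length]; omega

theorem pvStateA_getD_lt (T : List Int) (K n m j : Nat) (hj : j < m) :
    (pvStateA T K n m).getD j none = some (pvDpv T K j) := by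
  rw [pvStateA, List.getD_append _ _ _ _ (by simp [pvDpl_length]; omega)]
  rw [List.getD_eq_getElem _ _ (by simp [pvDpl_length]; omega), List.getElem_map]
  congr 1
  have := pvDpl_getD T K m j hj
  rw [List.getD_eq_getElem _ _ (by rw [pvDpl_length]; omega)] at this
  exact this

theorem pvStateA_getD_ge (T : List Int) (K n m j : Nat) (hj : m ≤ j) (_hjn : j < n) :
    (pvStateA T K n m).getD j none = none := by
  rw [pvStateA, List.getD_eq_getElem?_getD,
      List.getElem?_append_right (by simp [pvDpl_length]; omega)]
  simp only [List.getElem?_replicate]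
  split <;> simp

theorem pvStateA_set (T : List Int) (K n m : Nat) (hm : m < n) (v : Int)
    (hv : v = pvDpv T K m) :
    (pvStateA T K n m).set m (some v) = pvStateA T K n (m + 1) := by
  have hlen : ((pvDpl T K m).map some).length = m := by simp [pvDpl_length]
  have hset := pvSetAppendReplicate ((pvDpl T K m).map some) (n - m) none (some v) (by omega)
  rw [hlen] at hset
  rw [pvStateA, hset, pvStateA]
  have : pvDpl T K (m + 1) = pvDpl T K m
      ++ [if m < K then T.getD m 0 else T.getD m 0 + pvWmin (((pvDpl T K m).drop (m - K)).take K)] := rfl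
  rw [this]
  have hval : pvDpv T K m
      = if m < K then T.getD m 0 else T.getD m 0 + pvWmin (((pvDpl T K m).drop (m - K)).take K) := by
    simp [pvDpv, pvDpl, pvDpl_length]
  rw [hv, hval]
  simp
  omega

-- the inner `for j` loop of A updates only slot ii, folding pyominf over the window values
theorem pvInnerFold (ti : Int) (js : List Int) (ii : Nat) :
    ∀ DP : List (Option Int), ii < DP.length → (∀ j ∈ js, (0:Int) ≤ j ∧ j.toNat ≠ ii) →
    js.foldl (fun D j => D.set ii (pyominf (D.getD ii none)
        ((D.getD j.toNat none).map (fun d => ti + d)))) DP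
    = DP.set ii (js.foldl (fun c j => pyominf c
        ((DP.getD j.toNat none).map (fun d => ti + d))) (DP.getD ii none)) := by
  induction js with
  | nil =>
    intro DP hlen _
    simp only [List.foldl_nil]
    rw [List.getD_eq_getElem _ _ hlen, List.set_getElem_self]
  | cons j rest ih =>
    intro DP hlen hjs
    simp only [List.foldl_cons]
    set w := pyominf (DP.getD ii none) ((DP.getD j.toNat none).map (fun d => ti + d)) with hw
    have hlen' : ii < (DP.set ii w).length := by simpa using hlen
    rw [ih (DP.set ii w) hlen' (fun x hx => hjs x (List.mem_cons_of_mem _ hx))]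
    rw [List.set_set]
    congr 1
    have hgetset : (DP.set ii w).getD ii none = w := by
      rw [List.getD_eq_getElem?_getD, List.getElem?_set_self' ]
      simp [show ii < DP.length from hlen]
    rw [hgetset]
    apply PySem.List.foldl_congr_mem
    intro acc x hx
    have hne : x.toNat ≠ ii := (hjs x (List.mem_cons_of_mem _ hx)).2
    rw [List.getD_eq_getElem?_getD, List.getElem?_set_ne (by omega), ← List.getD_eq_getElem?_getD]

-- a fold of pyominf over F on the window [m-K, m) is `some` of the window minimum
theorem pvFoldWindow (m K : Nat) (vals : Int → Int) (h1 : 1 ≤ K) (hKm : K ≤ m)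
    (F : Int → Option Int)
    (hF : ∀ j : Int, (m : Int) - (K : Int) ≤ j → j < (m : Int) → F j = some (vals j)) :
    (PySem.List.pyRange ((m : Int) - (K : Int)) (m : Int) 1).foldl
      (fun c j => pyominf c (F j)) none
    = some (pvWmin ((List.range K).map (fun t => vals (((m - K + t : Nat) : Int))))) := by
  rw [show (m : Int) - (K : Int) = ((m - K : Nat) : Int) by omega, PySem.List.pyRange_one]
  rw [List.foldl_map]
  rw [show (((m : Int)) - ((m - K : Nat) : Int)).toNat = K by omega]
  rw [PySem.List.foldl_congr_mem (List.range K) _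
      (fun c t => pyominf c (some (vals (((m - K + t : Nat) : Int))))) none ?_]
  · rw [← List.foldl_map (f := fun t => vals (((m - K + t : Nat) : Int)))
        (g := fun c v => pyominf c (some v))]
    apply pvFoldlOminfNone
    simp [List.map_eq_nil_iff, List.range_eq_nil]
    omega
  · intro acc t ht
    have htK : t < K := List.mem_range.mp ht
    rw [hF _ (by omega) (by omega)]
    show pyominf acc (some (vals (↑(m - K) + ↑t))) = pyominf acc (some (vals ↑(m - K + t)))
    have hc : ((m - K : Nat) : Int) + (t : Int) = ((m - K + t : Nat) : Int) := by omega
    rw [hc]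

theorem pvBaseFold (T : List Int) (K : Nat) (_hK : K < T.length) :
    ∀ m : Nat, m ≤ K →
    (PySem.List.pyRange 0 (m : Int) 1).foldl
      (fun DP i => DP.set i.toNat (some (PySem.List.pyGetD T i 0))) (pvStateA T K T.length 0)
    = pvStateA T K T.length m := by
  intro m
  induction m with
  | zero => intro _; rw [PySem.List.pyRange_one_eq_nil (by omega)]; rfl
  | succ m ih =>
    intro hm
    rw [show ((m + 1 : Nat) : Int) = (m : Int) + 1 by push_cast; ring,
        PySem.List.pyRange_one_succ_right (by omega), List.foldl_append, ih (by omega)]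
    simp only [List.foldl_cons, List.foldl_nil, Int.toNat_natCast, PySem.List.pyGetD_natCast]
    exact pvStateA_set T K T.length m (by omega) _ (pvDpv_lt T K m (by omega)).symm

theorem pvMainStep (T : List Int) (K m : Nat) (h2 : 2 ≤ K) (hKm : K ≤ m) (hm : m < T.length) :
    (PySem.List.pyRange ((m : Int) - (K : Int)) (m : Int) 1).foldl
      (fun DP j => DP.set ((m : Int)).toNat (pyominf (DP.getD ((m : Int)).toNat none)
        ((DP.getD j.toNat none).map (fun d => PySem.List.pyGetD T (m : Int) 0 + d))))
      (pvStateA T K T.length m)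
    = pvStateA T K T.length (m + 1) := by
  simp only [Int.toNat_natCast, PySem.List.pyGetD_natCast]
  rw [pvInnerFold (T.getD m 0) _ m (pvStateA T K T.length m)
      (by rw [pvStateA_length T K _ m (by omega)]; omega) ?_]
  · rw [pvStateA_getD_ge T K T.length m m (le_refl m) hm]
    rw [pvFoldWindow m K (fun j => T.getD m 0 + pvDpv T K j.toNat) (by omega) hKm _ ?_]
    · have hmap : (List.range K).map
            (fun t => T.getD m 0 + pvDpv T K (((m - K + t : Nat) : Int)).toNat)
          = ((List.range K).map (fun t => pvDpv T K (m - K + t))).map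
              (fun d => T.getD m 0 + d) := by
        rw [List.map_map]
        apply List.map_congr_left
        intro t _
        show T.getD m 0 + pvDpv T K ((((m - K + t : Nat)) : Int)).toNat
            = T.getD m 0 + pvDpv T K (m - K + t)
        congr 1
      rw [hmap, pvWmin_add _ _ (by simp [List.map_eq_nil_iff, List.range_eq_nil]; omega)]
      exact pvStateA_set T K T.length m hm _
        (pvDpv_ge T K m (by omega) hKm).symm
    · intro j hj1 hj2
      have hj0 : (0 : Int) ≤ j := by omega
      have hjlt : j.toNat < m := by omega
      rw [pvStateA_getD_lt T K T.length m j.toNat hjlt]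
      rfl
  · intro j hj
    rcases PySem.List.mem_pyRange_one.mp hj with ⟨hj1, hj2⟩
    constructor
    · omega
    · omega

theorem pvMainFold (T : List Int) (K : Nat) (h2 : 2 ≤ K) (_hK : K < T.length) :
    ∀ m : Nat, K ≤ m → m ≤ T.length →
    (PySem.List.pyRange (K : Int) (m : Int) 1).foldl
      (fun DP i =>
        (PySem.List.pyRange (i - (K : Int)) i 1).foldl
          (fun DP j => DP.set i.toNat (pyominf (DP.getD i.toNat none)
            ((DP.getD j.toNat none).map (fun d => PySem.List.pyGetD T i 0 + d)))) DP)
      (pvStateA T K T.length K)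
    = pvStateA T K T.length m := by
  intro m
  induction m with
  | zero => intro h _; omega
  | succ m ih =>
    intro hKm hm
    by_cases hKm' : K ≤ m
    · rw [show ((m + 1 : Nat) : Int) = (m : Int) + 1 by push_cast; ring,
          PySem.List.pyRange_one_succ_right (by omega), List.foldl_append, ih hKm' (by omega)]
      simp only [List.foldl_cons, List.foldl_nil]
      exact pvMainStep T K m h2 hKm' (by omega)
    · have : m + 1 = K := by omega
      rw [this, PySem.List.pyRange_one_eq_nil (by omega)]
      rfl

theorem pvAbranch (T : List Int) (K : Nat) (h2 : 2 ≤ K) (hK : K < T.length) :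
    ksuma T (K : Int) = pvWmin ((pvDpl T K T.length).drop (T.length - K)) := by
  have h1 : ¬((K : Int) = 1) := by omega
  have hge : ¬((K : Int) ≥ (T.length : Int)) := by omega
  rw [ksuma]
  simp only [h1, hge, if_false]
  have hinit : ((List.range T.length).map (fun _ => (none : Option Int)))
      = pvStateA T K T.length 0 := by
    simp [pvStateA, pvDpl]
  rw [hinit, pvBaseFold T K hK K (le_refl K), pvMainFold T K h2 hK T.length (by omega) (le_refl _)]
  rw [pvFoldWindow T.length K (fun j => pvDpv T K j.toNat) (by omega) (by omega) _ ?_]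
  · rw [pvWin_eq T K T.length (by omega)]
    congr 1
  · intro j hj1 hj2
    have hjlt : j.toNat < T.length := by omega
    rw [pvStateA_getD_lt T K T.length T.length j.toNat hjlt]

-- ---------- side B ----------

-- popping then appending (m, dp m) preserves all deque properties at m+1
theorem pvPush (T : List Int) (K m : Nat) (q1 : List (Int × Int))
    (hk : q1.Pairwise (fun p q => p.1 < q.1))
    (hv : q1.Pairwise (fun p q => p.2 < q.2))
    (hmem : ∀ p ∈ q1, ∃ j : Nat, p.1 = (j : Int) ∧ j < m ∧ p.2 = pvDpv T K j)
    (hcov : ∀ j : Nat, j < m → m + 1 ≤ K + j →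
        ∃ p ∈ q1, (j : Int) ≤ p.1 ∧ p.2 ≤ pvDpv T K j) :
    (pvPopSpec (pvDpv T K m) q1 ++ [((m : Int), pvDpv T K m)]).Pairwise (fun p q => p.1 < q.1) ∧
    (pvPopSpec (pvDpv T K m) q1 ++ [((m : Int), pvDpv T K m)]).Pairwise (fun p q => p.2 < q.2) ∧
    (∀ p ∈ pvPopSpec (pvDpv T K m) q1 ++ [((m : Int), pvDpv T K m)],
        ∃ j : Nat, p.1 = (j : Int) ∧ j < m + 1 ∧ p.2 = pvDpv T K j) ∧
    (pvPopSpec (pvDpv T K m) q1 ++ [((m : Int), pvDpv T K m)]).getLast?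
        = some (((m : Int)), pvDpv T K m) ∧
    (∀ j : Nat, j < m + 1 → m + 1 ≤ K + j →
        ∃ p ∈ pvPopSpec (pvDpv T K m) q1 ++ [((m : Int), pvDpv T K m)],
          (j : Int) ≤ p.1 ∧ p.2 ≤ pvDpv T K j) := by
  set v := pvDpv T K m with hvdef
  set q2 := pvPopSpec v q1 with hq2
  have hsub : ∀ p ∈ q2, p ∈ q1 := fun p hp => (pvPopSpec_prefix v q1).sublist.mem hp
  have hk2 : q2.Pairwise (fun p q => p.1 < q.1) := hk.sublist (pvPopSpec_prefix v q1).sublist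
  have hv2 : q2.Pairwise (fun p q => p.2 < q.2) := hv.sublist (pvPopSpec_prefix v q1).sublist
  refine ⟨?_, ?_, ?_, ?_, ?_⟩
  · rw [List.pairwise_append]
    refine ⟨hk2, List.pairwise_singleton _ _, ?_⟩
    intro p hp b hb
    simp at hb; subst hb
    rcases hmem p (hsub p hp) with ⟨j, hj1, hj2, _⟩
    rw [hj1]; simp; omega
  · rw [List.pairwise_append]
    refine ⟨hv2, List.pairwise_singleton _ _, ?_⟩
    intro p hp b hb
    simp at hb; subst hb
    show p.2 < v
    -- p.2 ≤ last of q2 < v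
    have hne : q2 ≠ [] := by intro h0; rw [h0] at hp; cases hp
    have hlast := List.getLast?_eq_some_getLast (l := q2) hne
    have hlt := pvPopSpec_last v q1 (q2.getLast hne) (by rw [← hq2]; exact hlast)
    rcases pvPairwiseLast _ q2 (q2.getLast hne) hv2 hlast p hp with rfl | hplt
    · exact hlt
    · exact lt_trans hplt hlt
  · intro p hp
    rcases List.mem_append.mp hp with h1 | h1
    · rcases hmem p (hsub p h1) with ⟨j, hj1, hj2, hj3⟩
      exact ⟨j, hj1, by omega, hj3⟩
    · simp at h1; subst h1
      exact ⟨m, rfl, by omega, rfl⟩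
  · rw [List.getLast?_concat]
  · intro j hj hj2
    by_cases hjm : j = m
    · subst hjm
      exact ⟨((j : Int), v), List.mem_append_right _ (by simp), le_refl _, le_of_eq hvdef⟩
    · rcases hcov j (by omega) hj2 with ⟨p, hp, hple, hpv⟩
      rcases pvPopSpec_removed v q1 p hp with hin | hge
      · exact ⟨p, List.mem_append_left _ hin, hple, hpv⟩
      · refine ⟨((m : Int), v), List.mem_append_right _ (by simp), ?_, ?_⟩
        · rcases hmem p hp with ⟨j', hj'1, hj'2, _⟩
          rw [hj'1] at hple
          have : j < m := by omega
          omega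
        · exact le_trans hge hpv

theorem pvMemDropWhile {α : Type} (p : α → Bool) (l : List α) (x : α)
    (hx : x ∈ l) (hpx : p x = false) : x ∈ l.dropWhile p := by
  have hsplit := List.takeWhile_append_dropWhile (p := p) (l := l)
  rw [← hsplit] at hx
  rcases List.mem_append.mp hx with h | h
  · have := List.mem_takeWhile_imp h; rw [hpx] at this; cases this
  · exact h

theorem pvDplSet (T : List Int) (K n m : Nat) (hm : m < n) (v : Int)
    (hv : v = pvDpv T K m) :
    (pvDpl T K m ++ List.replicate (n - m) (0 : Int)).set m v
      = pvDpl T K (m + 1) ++ List.replicate (n - (m + 1)) 0 := by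
  have hset := pvSetAppendReplicate (pvDpl T K m) (n - m) 0 v (by omega)
  rw [pvDpl_length] at hset
  rw [hset]
  have hstep : pvDpl T K (m + 1) = pvDpl T K m
      ++ [if m < K then T.getD m 0 else T.getD m 0 + pvWmin (((pvDpl T K m).drop (m - K)).take K)] := rfl
  have hval : pvDpv T K m
      = if m < K then T.getD m 0 else T.getD m 0 + pvWmin (((pvDpl T K m).drop (m - K)).take K) := by
    simp [pvDpv, pvDpl, pvDpl_length]
  rw [hstep, hv, hval]
  simp
  omega

theorem pvStep_eq (T : List Int) (k : Int) (DP : List Int) (dq : List (Int × Int))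
    (head : Nat) (i : Int) :
    pvStep T k (DP, dq, head) i =
      (if i < k then
        (DP.set i.toNat (PySem.List.pyGetD T i 0),
         ksumaPop (PySem.List.pyGetD T i 0) head dq ++ [(i, PySem.List.pyGetD T i 0)], head)
      else
        (DP.set i.toNat (PySem.List.pyGetD T i 0 + (dq.getD (ksumaAdvance dq (i - k) head) (0, 0)).2),
         ksumaPop (PySem.List.pyGetD T i 0 + (dq.getD (ksumaAdvance dq (i - k) head) (0, 0)).2)
           (ksumaAdvance dq (i - k) head) dq
           ++ [(i, PySem.List.pyGetD T i 0 + (dq.getD (ksumaAdvance dq (i - k) head) (0, 0)).2)],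
         ksumaAdvance dq (i - k) head)) := by
  rw [pvStep]
  by_cases h : i < k <;> simp [h]

theorem pvStepB (T : List Int) (K m : Nat) (DP : List Int) (dq : List (Int × Int)) (head : Nat)
    (h2 : 2 ≤ K) (_hK : K < T.length) (hm1 : 1 ≤ m) (hm : m < T.length)
    (hinv : pvInv T K T.length m (DP, dq, head)) :
    pvInv T K T.length (m + 1) (pvStep T (K : Int) (DP, dq, head) (m : Int)) := by
  obtain ⟨hDP, hhead, hkq, hvq, hmemq, hlastq, hcovq⟩ := hinv
  simp only at hDP hhead hkq hvq hmemq hlastq hcovq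
  by_cases hiK : (m : Int) < (K : Int)
  · -- base phase: v = T[m]
    have hmK : m < K := by omega
    rw [pvStep_eq, if_pos hiK]
    simp only [Int.toNat_natCast, PySem.List.pyGetD_natCast]
    have hv : T.getD m 0 = pvDpv T K m := (pvDpv_lt T K m hmK).symm
    have hpop := pvPop_eq (T.getD m 0) head dq hhead
    have hlen : (dq.take head).length = head := by simp; omega
    have hq' : (ksumaPop (T.getD m 0) head dq ++ [((m : Int), T.getD m 0)]).drop head
        = pvPopSpec (T.getD m 0) (dq.drop head) ++ [((m : Int), T.getD m 0)] := by
      rw [hpop, List.append_assoc]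
      exact List.drop_left' hlen
    have hpush := pvPush T K m (dq.drop head) hkq hvq hmemq
      (fun j hj hj2 => hcovq j hj (by omega))
    refine ⟨?_, ?_, ?_, ?_, ?_, ?_, ?_⟩
    · simp only
      rw [hDP]
      exact pvDplSet T K T.length m hm _ hv
    · simp only
      rw [hpop, List.append_assoc, List.length_append, hlen]
      omega
    · show ((ksumaPop (T.getD m 0) head dq ++ [((m : Int), T.getD m 0)]).drop head).Pairwise _
      rw [hq', hv]; exact hpush.1
    · show ((ksumaPop (T.getD m 0) head dq ++ [((m : Int), T.getD m 0)]).drop head).Pairwise _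
      rw [hq', hv]; exact hpush.2.1
    · show ∀ p ∈ (ksumaPop (T.getD m 0) head dq ++ [((m : Int), T.getD m 0)]).drop head, _
      rw [hq', hv]; exact hpush.2.2.1
    · show ((ksumaPop (T.getD m 0) head dq ++ [((m : Int), T.getD m 0)]).drop head).getLast? = _
      rw [hq', hv]
      rw [hpush.2.2.2.1]
      simp
    · show ∀ j : Nat, j < m + 1 → m + 1 ≤ K + j →
          ∃ p ∈ (ksumaPop (T.getD m 0) head dq ++ [((m : Int), T.getD m 0)]).drop head, _
      rw [hq', hv]; exact hpush.2.2.2.2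
  · -- dp phase: advance the front pointer, v = T[m] + min of window
    have hmK : K ≤ m := by omega
    rw [pvStep_eq, if_neg hiK]
    simp only [Int.toNat_natCast, PySem.List.pyGetD_natCast]
    set limit : Int := (m : Int) - (K : Int) with hlimit
    set head' := ksumaAdvance dq limit head with hhead'
    obtain ⟨hdrop', hle'⟩ := pvAdvance_drop dq limit head
    rw [← hhead'] at hdrop' hle'
    set q1 := (dq.drop head).dropWhile (fun p => decide (p.1 < limit)) with hq1
    -- the live deque is nonempty: its last element (m-1, dp (m-1)) survives
    have hlastfail : (fun p : Int × Int => decide (p.1 < limit)) (((m - 1 : Nat) : Int), pvDpv T K (m - 1)) = false := by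
      simp only [decide_eq_false_iff_not]
      push_cast [Nat.cast_sub hm1]
      omega
    have hlast1 : q1.getLast? = some (((m - 1 : Nat) : Int), pvDpv T K (m - 1)) :=
      pvDropWhileLast _ _ _ hlastq hlastfail
    have hq1ne : q1 ≠ [] := by intro h0; rw [h0] at hlast1; cases hlast1
    obtain ⟨p1, t1, hq1eq⟩ := List.exists_cons_of_ne_nil hq1ne
    have hne' : dq.drop head' ≠ [] := by rw [hdrop']; exact hq1ne
    have hlt' : head' < dq.length := by
      by_contra h0
      exact hne' (List.drop_eq_nil_iff.mpr (by omega))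
    -- the front of the live deque
    have hfront : dq.getD head' (0, 0) = p1 := by
      rw [pvGetDDrop, hdrop', hq1eq]
      rfl
    have hsub1 : ∀ p ∈ q1, p ∈ dq.drop head := fun p hp =>
      (List.dropWhile_sublist _).mem hp
    have hkq1 : q1.Pairwise (fun p q => p.1 < q.1) := hkq.sublist (List.dropWhile_sublist _)
    have hvq1 : q1.Pairwise (fun p q => p.2 < q.2) := hvq.sublist (List.dropWhile_sublist _)
    have hp1mem : p1 ∈ q1 := by rw [hq1eq]; exact List.mem_cons_self
    -- front = (j0, dp j0) with m - K ≤ j0 < m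
    obtain ⟨j0, hj01, hj02, hj03⟩ := hmemq _ (hsub1 _ hp1mem)
    have hfrontfail : (fun p : Int × Int => decide (p.1 < limit)) p1 = false := by
      have hh := List.head?_dropWhile_not (fun p : Int × Int => decide (p.1 < limit)) (dq.drop head)
      rw [← hq1, hq1eq] at hh
      exact hh
    have hj0ge : m - K ≤ j0 := by
      simp only [decide_eq_false_iff_not, hj01, hlimit] at hfrontfail
      omega
    -- the front value is the window minimum
    have hwin : p1.2 = pvWmin ((List.range K).map (fun t => pvDpv T K (m - K + t))) := by
      symm
      apply pvWmin_eq_of_le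
      · rw [hj03]
        refine List.mem_map.mpr ⟨j0 - (m - K), List.mem_range.mpr (by omega), ?_⟩
        congr 1
        omega
      · intro y hy
        obtain ⟨t, ht, rfl⟩ := List.mem_map.mp hy
        have htK : t < K := List.mem_range.mp ht
        obtain ⟨p, hp, hple, hpv⟩ := hcovq (m - K + t) (by omega) (by omega)
        have hpfail : (fun p : Int × Int => decide (p.1 < limit)) p = false := by
          simp only [decide_eq_false_iff_not, hlimit]
          have hcast : ((m - K + t : Nat) : Int) = (m : Int) - (K : Int) + (t : Int) := by
            push_cast [Nat.cast_sub hmK]; ring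
          omega
        have hp1' : p ∈ q1 := pvMemDropWhile _ _ p hp hpfail
        have hhle : p1.2 ≤ p.2 := by
          rw [hq1eq] at hp1' hvq1
          rcases List.mem_cons.mp hp1' with rfl | hin
          · exact le_refl _
          · exact le_of_lt ((List.pairwise_cons.mp hvq1).1 p hin)
        exact le_trans hhle hpv
    -- so the computed value is dp m
    have hv : T.getD m 0 + (dq.getD head' (0, 0)).2 = pvDpv T K m := by
      rw [hfront, hwin, (pvDpv_ge T K m (by omega) hmK).symm]
    set v := T.getD m 0 + (dq.getD head' (0, 0)).2 with hvdef
    have hpop := pvPop_eq v head' dq (by omega)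
    have hlen : (dq.take head').length = head' := by simp; omega
    have hq' : (ksumaPop v head' dq ++ [((m : Int), v)]).drop head'
        = pvPopSpec v q1 ++ [((m : Int), v)] := by
      rw [hpop, List.append_assoc, List.drop_left' hlen, hdrop']
    have hmem1 : ∀ p ∈ q1, ∃ j : Nat, p.1 = (j : Int) ∧ j < m ∧ p.2 = pvDpv T K j :=
      fun p hp => hmemq p (hsub1 p hp)
    have hcov1 : ∀ j : Nat, j < m → m + 1 ≤ K + j →
        ∃ p ∈ q1, (j : Int) ≤ p.1 ∧ p.2 ≤ pvDpv T K j := by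
      intro j hj hj2
      obtain ⟨p, hp, hple, hpv⟩ := hcovq j hj (by omega)
      have hpfail : (fun p : Int × Int => decide (p.1 < limit)) p = false := by
        simp only [decide_eq_false_iff_not, hlimit]
        obtain ⟨j', hj'1, hj'2, _⟩ := hmemq p hp
        rw [hj'1] at hple ⊢
        omega
      exact ⟨p, pvMemDropWhile _ _ p hp hpfail, hple, hpv⟩
    have hpush := pvPush T K m q1 hkq1 hvq1 hmem1 hcov1
    refine ⟨?_, ?_, ?_, ?_, ?_, ?_, ?_⟩
    · simp only
      rw [hDP]
      exact pvDplSet T K T.length m hm v hv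
    · simp only
      rw [hpop, List.append_assoc, List.length_append, hlen]
      omega
    · show ((ksumaPop v head' dq ++ [((m : Int), v)]).drop head').Pairwise _
      rw [hq', hv]; exact hpush.1
    · show ((ksumaPop v head' dq ++ [((m : Int), v)]).drop head').Pairwise _
      rw [hq', hv]; exact hpush.2.1
    · show ∀ p ∈ (ksumaPop v head' dq ++ [((m : Int), v)]).drop head', _
      rw [hq', hv]; exact hpush.2.2.1
    · show ((ksumaPop v head' dq ++ [((m : Int), v)]).drop head').getLast? = _
      rw [hq', hv, hpush.2.2.2.1]
      simp
    · show ∀ j : Nat, j < m + 1 → m + 1 ≤ K + j →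
          ∃ p ∈ (ksumaPop v head' dq ++ [((m : Int), v)]).drop head', _
      rw [hq', hv]; exact hpush.2.2.2.2

theorem pvStep0 (T : List Int) (K : Nat) (h2 : 2 ≤ K) (hK : K < T.length) :
    pvInv T K T.length 1
      (pvStep T (K : Int) (((List.range T.length).map (fun _ => (0 : Int))), ([], 0)) 0) := by
  rw [pvStep_eq, if_pos (by omega)]
  have hget : PySem.List.pyGetD T 0 0 = T.getD 0 0 := by
    simpa using PySem.List.pyGetD_natCast T 0 0
  have hpop : ksumaPop (PySem.List.pyGetD T 0 0) 0 ([] : List (Int × Int)) = [] := by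
    rw [ksumaPop]; simp
  have hv : T.getD 0 0 = pvDpv T K 0 := (pvDpv_lt T K 0 (by omega)).symm
  have hinit : ((List.range T.length).map (fun _ => (0 : Int)))
      = pvDpl T K 0 ++ List.replicate (T.length - 0) 0 := by
    simp [pvDpl]
  refine ⟨?_, ?_, ?_, ?_, ?_, ?_, ?_⟩
  · simp only
    rw [hinit, hget]
    exact pvDplSet T K T.length 0 (by omega) _ hv
  · simp [hpop]
  · simp [hpop]
  · simp [hpop]
  · simp only [hpop, List.nil_append, List.drop_zero]
    intro p hp
    simp at hp; subst hp
    refine ⟨0, by simp, by omega, ?_⟩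
    show PySem.List.pyGetD T 0 0 = pvDpv T K 0
    rw [hget]; exact hv
  · simp only [hpop, List.nil_append, List.drop_zero, List.getLast?_singleton]
    rw [hget, hv]
    rfl
  · simp only [hpop, List.nil_append, List.drop_zero]
    intro j hj _
    have : j = 0 := by omega
    subst this
    refine ⟨((0 : Int), PySem.List.pyGetD T 0 0), by simp, by simp, ?_⟩
    show PySem.List.pyGetD T 0 0 ≤ pvDpv T K 0
    rw [hget]; exact le_of_eq hv

theorem pvOuterB (T : List Int) (K : Nat) (h2 : 2 ≤ K) (hK : K < T.length) :
    ∀ m : Nat, 1 ≤ m → m ≤ T.length →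
    pvInv T K T.length m
      ((PySem.List.pyRange 0 (m : Int) 1).foldl (pvStep T (K : Int))
        (((List.range T.length).map (fun _ => (0 : Int))), ([], 0))) := by
  intro m
  induction m with
  | zero => intro h _; omega
  | succ m ih =>
    intro _ hm
    by_cases hm1 : 1 ≤ m
    · rw [show ((m + 1 : Nat) : Int) = (m : Int) + 1 by push_cast; ring,
          PySem.List.pyRange_one_succ_right (by omega), List.foldl_append]
      simp only [List.foldl_cons, List.foldl_nil]
      exact pvStepB T K m _ _ _ h2 hK hm1 (by omega) (ih hm1 (by omega))
    · have h0 : m = 0 := by omega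
      subst h0
      rw [show ((1 : Nat) : Int) = (0 : Int) + 1 by simp,
          PySem.List.pyRange_one_succ_right (by omega),
          PySem.List.pyRange_one_eq_nil (by omega)]
      simp only [List.nil_append, List.foldl_cons, List.foldl_nil]
      exact pvStep0 T K h2 hK

theorem pvAltEq (T : List Int) (k : Int) :
    ksuma_alt T k =
      (let n : Int := (T.length : Int)
       if k = 1 then T.foldl (· + ·) 0
       else if k ≥ n then (PySem.List.min? T (fun x => x)).getD 0
       else
         let st := (PySem.List.pyRange 0 n 1).foldl (pvStep T k)
           (((List.range T.length).map (fun _ => (0 : Int))), ([], 0))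
         (PySem.List.min? (PySem.List.slice st.1 (some (n - k)) none) (fun x => x)).getD 0) := rfl

theorem pvBbranch (T : List Int) (K : Nat) (h2 : 2 ≤ K) (hK : K < T.length) :
    ksuma_alt T (K : Int) = pvWmin ((pvDpl T K T.length).drop (T.length - K)) := by
  have h1 : ¬((K : Int) = 1) := by omega
  have hge : ¬((K : Int) ≥ (T.length : Int)) := by omega
  rw [pvAltEq]
  simp only [h1, hge, if_false]
  have hst := pvOuterB T K h2 hK T.length (by omega) (le_refl _)
  obtain ⟨hDP, -, -, -, -, -, -⟩ := hst
  rw [hDP]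
  simp only [Nat.sub_self, List.replicate_zero, List.append_nil]
  rw [show (T.length : Int) - (K : Int) = ((T.length - K : Nat) : Int) by omega,
      PySem.List.slice_from_natCast]
  have hlen : ((pvDpl T K T.length).drop (T.length - K)).length = K := by
    simp [pvDpl_length]; omega
  rcases hdk : (pvDpl T K T.length).drop (T.length - K) with _ | ⟨x, t⟩
  · rw [hdk] at hlen; simp at hlen; omega
  · rw [PySem.List.min?_id_cons]
    rfl

-- ===== VERDICT (by name: the statement is the Claim_ definition above) =====
theorem ksuma_spec : Claim_equal_ksuma := by
  intro T k _ hpre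
  unfold Spec_ksuma
  obtain ⟨hk1, -⟩ := hpre
  by_cases h1 : k = 1
  · rw [ksuma, pvAltEq]
    simp only [if_pos h1]
  · by_cases h2 : k ≥ (T.length : Int)
    · rw [ksuma, pvAltEq]
      simp only [if_neg h1, if_pos h2]
    · have hkK : k = (k.toNat : Int) := by omega
      rw [hkK, pvAbranch T k.toNat (by omega) (by omega),
          pvBbranch T k.toNat (by omega) (by omega)]
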